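-- pv_equiv track=rewrite | github.com/kauverysreerajendran/TTT-March2026 | IQF/views-a.py | iqf_reduce_quantities_optimally
-- ===== SOURCE A (Python) =====
-- def iqf_reduce_quantities_optimally(available_quantities, qty_to_reduce):
--     """
--     Reduce quantities optimally for IQF
--     """
--     quantities = available_quantities.copy()
--     remaining = qty_to_reduce
--
--     # Consume from larger trays first? Or smaller?
--     # Brass QC strategy: Existing trays consume optimally.
--     # Let's consume from LARGEST first to mimic Brass QC "Existing" logic.
--     sorted_indices = sorted(range(len(quantities)), key=lambda i: quantities[i], reverse=True)
--
--     for i in sorted_indices: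
--         if remaining <= 0: break
--         current_qty = quantities[i]
--         if current_qty > 0:
--             consume = min(remaining, current_qty)
--             quantities[i] -= consume
--             remaining -= consume
--     return quantities
-- ===== SOURCE B (Python) =====
-- def iqf_reduce_quantities_optimally(available_quantities, qty_to_reduce):
--     """
--     Reduce quantities optimally for IQF: repeatedly consume from the
--     currently-largest positive tray (first occurrence on ties) -- no sort.
--     """
--     quantities = available_quantities.copy()
--     remaining = qty_to_reduce
--     while remaining > 0:
--         best_idx, best_val = -1, 0
--         for j, v in enumerate(quantities):
--             if v > best_val:
--                 best_idx, best_val = j, v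
--         if best_idx < 0:
--             break
--         consume = min(remaining, best_val)
--         quantities[best_idx] -= consume
--         remaining -= consume
--     return quantities
-- ===== Notes on version B (the rewrite author's own statement) =====
-- stated objective: alternative
-- what changed: B drops A's full descending pre-sort of tray indices and instead repeatedly scans for the first-occurrence largest positive tray, consuming it before rescanning (repeated max-selection greedy instead of sort-then-fold).
import Mathlib
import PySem

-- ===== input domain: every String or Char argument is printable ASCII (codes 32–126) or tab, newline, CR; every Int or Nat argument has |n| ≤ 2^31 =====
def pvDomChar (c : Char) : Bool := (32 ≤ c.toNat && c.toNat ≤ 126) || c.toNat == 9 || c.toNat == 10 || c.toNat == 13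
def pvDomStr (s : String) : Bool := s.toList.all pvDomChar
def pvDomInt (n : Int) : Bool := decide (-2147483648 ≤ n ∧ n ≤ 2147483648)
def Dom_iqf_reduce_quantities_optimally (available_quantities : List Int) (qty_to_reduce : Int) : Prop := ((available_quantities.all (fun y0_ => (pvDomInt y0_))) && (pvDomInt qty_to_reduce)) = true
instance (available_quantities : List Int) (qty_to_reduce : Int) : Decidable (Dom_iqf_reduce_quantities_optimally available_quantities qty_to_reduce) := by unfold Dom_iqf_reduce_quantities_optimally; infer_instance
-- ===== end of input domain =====

-- B replaces A's descending pre-sort of tray indices by repeated first-occurrence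
-- max-selection over the trays (objective: alternative algorithm, same return value).

-- ===== PORT A =====
-- A's 'for i in sorted_indices' loop with its 'break' (early return on remaining <= 0);
-- i always comes from range(len(quantities)), so pyGetD/pySetD are exact here.
def pvAloop (quantities : List Int) (remaining : Int) (idxs : List Int) : List Int :=
  match idxs with
  | [] => quantities
  | i :: rest =>
    if remaining ≤ 0 then quantities
    else
      let current_qty := PySem.List.pyGetD quantities i 0
      if 0 < current_qty then
        let consume := min remaining current_qty
        pvAloop (PySem.List.pySetD quantities i (current_qty - consume)) (remaining - consume) rest
      else pvAloop quantities remaining rest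

def iqf_reduce_quantities_optimally (available_quantities : List Int) (qty_to_reduce : Int) : List Int :=
  let quantities := available_quantities
  let remaining := qty_to_reduce
  let sorted_indices := PySem.List.sorted (PySem.List.pyRange 0 (quantities.length : Int) 1)
      (fun i => PySem.List.pyGetD quantities i 0) true
  pvAloop quantities remaining sorted_indices

-- ===== PORT B =====
-- B's inner 'for j, v in enumerate(quantities)' scan: (best_idx, best_val), starting (-1, 0)
def pvFindBest (quantities : List Int) : Int × Int :=
  (PySem.List.enumerate quantities 0).foldl
    (fun acc jv => if acc.2 < jv.2 then jv else acc) (-1, 0)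

-- termination helper for pvBloop (cited in its decreasing_by)
lemma pvFindBest_foldl_inv (l : List (Int × Int)) (acc : Int × Int)
    (h : 0 ≤ acc.2 ∧ (0 ≤ acc.1 → 0 < acc.2)) :
    0 ≤ (l.foldl (fun acc jv => if acc.2 < jv.2 then jv else acc) acc).2 ∧
      (0 ≤ (l.foldl (fun acc jv => if acc.2 < jv.2 then jv else acc) acc).1 →
        0 < (l.foldl (fun acc jv => if acc.2 < jv.2 then jv else acc) acc).2) := by
  induction l generalizing acc with
  | nil => exact h
  | cons jv t ih =>
    simp only [List.foldl_cons]
    apply ih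
    by_cases hlt : acc.2 < jv.2
    · simp only [if_pos hlt]
      exact ⟨by omega, fun _ => by omega⟩
    · simpa only [if_neg hlt] using h

lemma pvFindBest_pos (q : List Int) (hb : ¬ (pvFindBest q).1 < 0) : 0 < (pvFindBest q).2 := by
  unfold pvFindBest at hb
  have h := pvFindBest_foldl_inv (PySem.List.enumerate q 0) (-1, 0) (by norm_num)
  unfold pvFindBest
  exact h.2 (by omega)

-- B's 'while remaining > 0' loop; best_idx is always a valid index when ≥ 0
def pvBloop (quantities : List Int) (remaining : Int) : List Int :=
  if h : 0 < remaining then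
    if hb : (pvFindBest quantities).1 < 0 then quantities
    else
      pvBloop
        (PySem.List.pySetD quantities (pvFindBest quantities).1
          (PySem.List.pyGetD quantities (pvFindBest quantities).1 0
            - min remaining (pvFindBest quantities).2))
        (remaining - min remaining (pvFindBest quantities).2)
  else quantities
termination_by remaining.toNat
decreasing_by
  have hpos := pvFindBest_pos quantities hb
  have h1 : min remaining (pvFindBest quantities).2 ≤ remaining := min_le_left _ _
  have h2 : 1 ≤ min remaining (pvFindBest quantities).2 := le_min (by omega) (by omega)
  omega

def iqf_reduce_quantities_optimally_alt (available_quantities : List Int) (qty_to_reduce : Int) : List Int :=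
  pvBloop available_quantities qty_to_reduce

-- ===== PRECONDITION & SPEC =====
def Spec_iqf_reduce_quantities_optimally (available_quantities : List Int) (qty_to_reduce : Int) (out : List Int) : Prop := out = iqf_reduce_quantities_optimally_alt available_quantities qty_to_reduce
instance (available_quantities : List Int) (qty_to_reduce : Int) (out : List Int) : Decidable (Spec_iqf_reduce_quantities_optimally available_quantities qty_to_reduce out) := by unfold Spec_iqf_reduce_quantities_optimally; infer_instance

-- ===== CLAIM (what is proved, stated in full; the proofs are below) =====
def Claim_equal_iqf_reduce_quantities_optimally : Prop := ∀ (available_quantities : List Int) (qty_to_reduce : Int), Dom_iqf_reduce_quantities_optimally available_quantities qty_to_reduce → Spec_iqf_reduce_quantities_optimally available_quantities qty_to_reduce (iqf_reduce_quantities_optimally available_quantities qty_to_reduce)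

-- ===== LEMMAS AND PROOFS =====

-- membership through PySem's insertion step
lemma pv_mem_insertBy {α : Type} (before : α → α → Bool) (x y : α) (l : List α) :
    y ∈ PySem.List.insertBy before x l ↔ y = x ∨ y ∈ l := by
  induction l with
  | nil => simp [PySem.List.insertBy]
  | cons h t ih =>
    by_cases hb : before x h = true
    · simp [PySem.List.insertBy, hb]
    · simp [PySem.List.insertBy, hb, ih]
      tauto

-- one insertion step keeps the "descending, stable" pairwise relation
lemma pv_insertBy_pairwise {α κ : Type} [LinearOrder κ] (key : α → κ) (r : α → α → Prop)
    (x : α) (l : List α)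
    (hl : l.Pairwise (fun a b => key b < key a ∨ (key a = key b ∧ r a b)))
    (hx : ∀ y ∈ l, r y x) :
    (PySem.List.insertBy (fun a b => decide (key b < key a)) x l).Pairwise
      (fun a b => key b < key a ∨ (key a = key b ∧ r a b)) := by
  induction l with
  | nil => simp [PySem.List.insertBy]
  | cons h t ih =>
    rw [List.pairwise_cons] at hl
    obtain ⟨hl1, hl2⟩ := hl
    by_cases hb : key h < key x
    · have : PySem.List.insertBy (fun a b => decide (key b < key a)) x (h :: t)
          = x :: h :: t := by simp [PySem.List.insertBy, hb]
      rw [this, List.pairwise_cons]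
      refine ⟨?_, List.pairwise_cons.mpr ⟨hl1, hl2⟩⟩
      intro y hy
      rcases List.mem_cons.mp hy with rfl | hyt
      · exact Or.inl hb
      · rcases hl1 y hyt with h1 | h1
        · exact Or.inl (h1.trans hb)
        · exact Or.inl (h1.1 ▸ hb)
    · have : PySem.List.insertBy (fun a b => decide (key b < key a)) x (h :: t)
          = h :: PySem.List.insertBy (fun a b => decide (key b < key a)) x t := by
        simp [PySem.List.insertBy, hb]
      rw [this, List.pairwise_cons]
      refine ⟨?_, ih hl2 (fun y hy => hx y (List.mem_cons_of_mem _ hy))⟩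
      intro y hy
      rcases (pv_mem_insertBy _ _ _ _).mp hy with rfl | hyt
      · rcases lt_or_eq_of_le (le_of_not_gt hb) with h1 | h1
        · exact Or.inl h1
        · exact Or.inr ⟨h1.symm, hx h (List.mem_cons_self)⟩
      · exact hl1 y hyt

-- stability of PySem's reverse sort: equal keys keep the original (r-)order
lemma pv_sorted_foldl_pairwise {α κ : Type} [LinearOrder κ] (key : α → κ) (r : α → α → Prop)
    (xs : List α) (acc : List α)
    (hacc : acc.Pairwise (fun a b => key b < key a ∨ (key a = key b ∧ r a b)))
    (hpend : ∀ y ∈ acc, ∀ z ∈ xs, r y z)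
    (hxs : xs.Pairwise r) :
    (xs.foldl (fun acc x => PySem.List.insertBy (fun a b => decide (key b < key a)) x acc) acc).Pairwise
      (fun a b => key b < key a ∨ (key a = key b ∧ r a b)) := by
  induction xs generalizing acc with
  | nil => exact hacc
  | cons x t ih =>
    rw [List.pairwise_cons] at hxs
    simp only [List.foldl_cons]
    apply ih
    · exact pv_insertBy_pairwise key r x acc hacc (fun y hy => hpend y hy x (List.mem_cons_self))
    · intro y hy z hz
      rcases (pv_mem_insertBy _ _ _ _).mp hy with rfl | hya
      · exact hxs.1 z hz
      · exact hpend y hya z (List.mem_cons_of_mem _ hz)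
    · exact hxs.2

lemma pv_sorted_rev_stable {α κ : Type} [LinearOrder κ] (xs : List α) (key : α → κ)
    (r : α → α → Prop) (hx : xs.Pairwise r) :
    (PySem.List.sorted xs key true).Pairwise
      (fun a b => key b < key a ∨ (key a = key b ∧ r a b)) := by
  have hs : PySem.List.sorted xs key true
      = xs.foldl (fun acc x => PySem.List.insertBy (fun a b => decide (key b < key a)) x acc) [] := by
    simp [PySem.List.sorted]
  rw [hs]
  exact pv_sorted_foldl_pairwise key r xs [] (by simp) (by simp) hx

-- indexing with a Nat cast
lemma pv_getD_nat (q : List Int) (j : Nat) (hj : j < q.length) :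
    PySem.List.pyGetD q (j : Int) 0 = q[j] := by
  have h := PySem.List.pyGetD_eq_getElem q (i := (j : Int)) 0 (by positivity) (by exact_mod_cast hj)
  simpa using h

-- A's loop is the identity once remaining ≤ 0
lemma pvAloop_nonpos_remaining (q : List Int) (r : Int) (idxs : List Int) (h : r ≤ 0) :
    pvAloop q r idxs = q := by
  cases idxs with
  | nil => rfl
  | cons i rest => simp [pvAloop, h]

-- A's loop is the identity when all its trays are empty
lemma pvAloop_nonpos_trays (idxs : List Int) (q : List Int) (r : Int)
    (h : ∀ i ∈ idxs, PySem.List.pyGetD q i 0 ≤ 0) :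
    pvAloop q r idxs = q := by
  induction idxs with
  | nil => rfl
  | cons i rest ih =>
    simp only [pvAloop]
    by_cases hr : r ≤ 0
    · simp [hr]
    · have := h i List.mem_cons_self
      simp only [if_neg hr, if_neg (by omega : ¬ 0 < PySem.List.pyGetD q i 0)]
      exact ih (fun j hj => h j (List.mem_cons_of_mem _ hj))

-- the scan does not move when no value beats the accumulator
lemma pvFold_stay (q : List Int) (s : Int) (acc : Int × Int) (h : ∀ v ∈ q, v ≤ acc.2) :
    (PySem.List.enumerate q s).foldl (fun acc jv => if acc.2 < jv.2 then jv else acc) acc = acc := by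
  induction q generalizing s acc with
  | nil => simp [PySem.List.enumerate]
  | cons v t ih =>
    rw [PySem.List.enumerate_cons, List.foldl_cons]
    have hv : ¬ acc.2 < v := not_lt.mpr (h v List.mem_cons_self)
    simp only [if_neg hv]
    exact ih (s + 1) acc (fun w hw => h w (List.mem_cons_of_mem _ hw))

-- the scan lands on the first occurrence of the strict maximum
lemma pvFold_max (q : List Int) (s : Int) (acc : Int × Int) (nb : Nat) (h1 : nb < q.length)
    (h2 : acc.2 < q[nb]) (h3 : ∀ j, (hj : j < q.length) → j < nb → q[j] < q[nb])
    (h4 : ∀ j, (hj : j < q.length) → q[j] ≤ q[nb]) :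
    (PySem.List.enumerate q s).foldl (fun acc jv => if acc.2 < jv.2 then jv else acc) acc
      = (s + (nb : Int), q[nb]) := by
  induction q generalizing s acc nb with
  | nil => exact absurd h1 (by simp)
  | cons x t ih =>
    rw [PySem.List.enumerate_cons, List.foldl_cons]
    cases nb with
    | zero =>
      simp only [List.getElem_cons_zero] at h2 ⊢
      simp only [if_pos h2]
      rw [pvFold_stay t (s + 1) (s, x)
        (fun w hw => by
          obtain ⟨j, hj, rfl⟩ := List.mem_iff_getElem.mp hw
          exact h4 (j + 1) (by simpa using hj))]
      simp
    | succ k =>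
      have hk : k < t.length := by simpa using h1
      have hx : x < (x :: t)[k + 1] := h3 0 (by simp) (by omega)
      have hacc : (if acc.2 < x then ((s : Int), x) else acc).2 < t[k] := by
        simp only [List.getElem_cons_succ] at hx h2
        by_cases hax : acc.2 < x <;> simp [hax] <;> [exact hx; exact h2]
      have := ih (s + 1) (if acc.2 < x then ((s : Int), x) else acc) k
        hk hacc
        (fun j hj hjk => by
          have := h3 (j + 1) (by simpa using hj) (by omega)
          simpa using this)
        (fun j hj => by
          have := h4 (j + 1) (by simpa using hj)
          simpa using this)
      rw [this]
      simp only [List.getElem_cons_succ]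
      congr 1
      push_cast
      ring

-- the main invariant: idxs lists (without repetition) valid indices, descending-stably
-- ordered by value, and every index outside idxs holds a non-positive value; then A's
-- remaining fold over idxs equals B's repeated max-selection loop.
lemma pv_main (idxs : List Int) : ∀ (q : List Int) (r : Int),
    (∀ i ∈ idxs, 0 ≤ i ∧ i < (q.length : Int)) →
    idxs.Nodup →
    idxs.Pairwise (fun a b => PySem.List.pyGetD q b 0 < PySem.List.pyGetD q a 0 ∨
      (PySem.List.pyGetD q a 0 = PySem.List.pyGetD q b 0 ∧ a < b)) →
    (∀ j : Int, 0 ≤ j → j < (q.length : Int) → j ∉ idxs → PySem.List.pyGetD q j 0 ≤ 0) →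
    pvAloop q r idxs = pvBloop q r := by
  induction idxs with
  | nil =>
    intro q r _ _ _ hd
    have hq : ∀ v ∈ q, v ≤ (0 : Int) := by
      intro v hv
      obtain ⟨j, hj, rfl⟩ := List.mem_iff_getElem.mp hv
      have h := hd (j : Int) (by positivity) (by exact_mod_cast hj) (by simp)
      rwa [pv_getD_nat q j hj] at h
    have hfb : pvFindBest q = (-1, 0) := pvFold_stay q 0 (-1, 0) hq
    rw [pvBloop]
    simp [pvAloop, hfb]
  | cons i rest ih =>
    intro q r ha hn hp hd
    have hi := ha i List.mem_cons_self
    rw [List.pairwise_cons] at hp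
    obtain ⟨hp1, hp2⟩ := hp
    rw [List.nodup_cons] at hn
    obtain ⟨hni, hnr⟩ := hn
    have hval : ∀ j : Nat, (hj : j < q.length) → PySem.List.pyGetD q (j : Int) 0 = q[j] :=
      fun j hj => pv_getD_nat q j hj
    by_cases hr : r ≤ 0
    · rw [pvBloop]
      simp [pvAloop, hr]
    have hnb : i.toNat < q.length := by omega
    have hgi : q[i.toNat] = PySem.List.pyGetD q i 0 := by
      rw [PySem.List.pyGetD_eq_getElem q 0 hi.1 hi.2]
    by_cases hc : 0 < PySem.List.pyGetD q i 0
    · -- the head of the sorted list is the first occurrence of the (positive) maximum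
      have hmax : ∀ j, (hj : j < q.length) → q[j] ≤ q[i.toNat] := by
        intro j hj
        by_cases hji : (j : Int) = i
        · have : j = i.toNat := by omega
          simp [this]
        · by_cases hjr : (j : Int) ∈ rest
          · rcases hp1 _ hjr with h | h
            · rw [← hval j hj] ; rw [hgi] ; omega
            · rw [← hval j hj] ; rw [hgi] ; omega
          · have := hd (j : Int) (by positivity) (by exact_mod_cast hj)
              (by simp [hji, hjr])
            rw [← hval j hj] ; rw [hgi] ; omega
      have hfirst : ∀ j, (hj : j < q.length) → j < i.toNat → q[j] < q[i.toNat] := by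
        intro j hj hji
        have hne : (j : Int) ≠ i := by omega
        by_cases hjr : (j : Int) ∈ rest
        · rcases hp1 _ hjr with h | h
          · rw [← hval j hj] ; rw [hgi] ; omega
          · exact absurd h.2 (by omega)
        · have := hd (j : Int) (by positivity) (by exact_mod_cast hj)
            (by simp [hne, hjr])
          rw [← hval j hj] ; rw [hgi] ; omega
      have hfb : pvFindBest q = (i, PySem.List.pyGetD q i 0) := by
        have h := pvFold_max q 0 (-1, 0) i.toNat hnb (by rw [hgi] ; exact hc) hfirst hmax
        rw [pvFindBest, h, hgi]
        simp [Int.toNat_of_nonneg hi.1]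
      simp only [pvAloop, if_neg hr, if_pos hc]
      conv_rhs => rw [pvBloop]
      rw [dif_pos (by omega : (0:Int) < r), hfb]
      rw [dif_neg (by omega : ¬ (i < 0))]
      by_cases h0 : r - min r (PySem.List.pyGetD q i 0) ≤ 0
      · rw [pvAloop_nonpos_remaining _ _ _ h0, pvBloop]
        rw [dif_neg (by omega : ¬ (0:Int) < r - min r (PySem.List.pyGetD q i 0))]
      · have hmr : min r (PySem.List.pyGetD q i 0) = PySem.List.pyGetD q i 0 := by
          rcases min_choice r (PySem.List.pyGetD q i 0) with h | h
          · omega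
          · exact h
        have hlen : (PySem.List.pySetD q i (PySem.List.pyGetD q i 0
            - min r (PySem.List.pyGetD q i 0))).length = q.length :=
          PySem.List.length_pySetD q i _
        have hval' : ∀ j : Int, 0 ≤ j → j < (q.length : Int) → j ≠ i →
            PySem.List.pyGetD (PySem.List.pySetD q i (PySem.List.pyGetD q i 0
              - min r (PySem.List.pyGetD q i 0))) j 0 = PySem.List.pyGetD q j 0 := by
          intro j hj0 hjl hjne
          have hne : i.toNat ≠ j.toNat := by omega
          rw [PySem.List.pySetD_of_nonneg q _ hi.1]
          rw [PySem.List.pyGetD_eq_getElem _ 0 hj0 (by simpa using hjl),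
            PySem.List.pyGetD_eq_getElem q 0 hj0 hjl]
          simp [hne]
        have hvi : PySem.List.pyGetD (PySem.List.pySetD q i (PySem.List.pyGetD q i 0
            - min r (PySem.List.pyGetD q i 0))) i 0 = 0 := by
          rw [PySem.List.pySetD_of_nonneg q _ hi.1]
          rw [PySem.List.pyGetD_eq_getElem _ 0 hi.1 (by simpa using hi.2)]
          simp
          omega
        apply ih
        · intro j hj
          have := ha j (List.mem_cons_of_mem _ hj)
          omega
        · exact hnr
        · refine List.Pairwise.imp_of_mem ?_ hp2
          intro a b hma hmb hab
          have haa := ha a (List.mem_cons_of_mem _ hma)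
          have hbb := ha b (List.mem_cons_of_mem _ hmb)
          rw [hval' a haa.1 haa.2 (fun e => hni (e ▸ hma)),
            hval' b hbb.1 hbb.2 (fun e => hni (e ▸ hmb))]
          exact hab
        · intro j hj0 hjl hjn
          rw [hlen] at hjl
          by_cases hje : j = i
          · rw [hje, hvi]
          · rw [hval' j hj0 hjl hje]
            exact hd j hj0 hjl (by simp [hje, hjn])
    · -- head value non-positive: every tray is empty, both sides return q unchanged
      have hrest : ∀ j ∈ rest, PySem.List.pyGetD q j 0 ≤ 0 := by
        intro j hj
        rcases hp1 j hj with h | h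
        · omega
        · omega
      simp only [pvAloop, if_neg hr, if_neg hc]
      rw [pvAloop_nonpos_trays rest q r hrest]
      have hq : ∀ v ∈ q, v ≤ (0 : Int) := by
        intro v hv
        obtain ⟨j, hj, rfl⟩ := List.mem_iff_getElem.mp hv
        rw [← hval j hj]
        by_cases hje : (j : Int) = i
        · rw [hje] ; omega
        · by_cases hjr : (j : Int) ∈ rest
          · exact hrest _ hjr
          · exact hd (j : Int) (by positivity) (by exact_mod_cast hj) (by simp [hje, hjr])
      have hfb : pvFindBest q = (-1, 0) := pvFold_stay q 0 (-1, 0) hq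
      rw [pvBloop]
      simp [hfb]

-- ===== VERDICT (by name: the statement is the Claim_ definition above) =====
theorem iqf_reduce_quantities_optimally_spec : Claim_equal_iqf_reduce_quantities_optimally := by
  intro q r _
  unfold Spec_iqf_reduce_quantities_optimally iqf_reduce_quantities_optimally
    iqf_reduce_quantities_optimally_alt
  apply pv_main
  · intro i hi
    have : i ∈ PySem.List.pyRange 0 (q.length : Int) 1 :=
      ((PySem.List.sorted_perm _ _ _).mem_iff).mp hi
    have := PySem.List.mem_pyRange_one.mp this
    omega
  · exact ((PySem.List.sorted_perm _ _ _).nodup_iff).mpr (PySem.List.nodup_pyRange_one _ _)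
  · exact pv_sorted_rev_stable _ _ _ (PySem.List.pairwise_lt_pyRange_one _ _)
  · intro j h0 hl hn
    exact absurd (((PySem.List.sorted_perm _ _ _).mem_iff).mpr
      (PySem.List.mem_pyRange_one.mpr ⟨h0, hl⟩)) hn
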